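-- pv_equiv track=rewrite | github.com/Shantanu1890/the-Qs-and-the-As | Python/IPS-8.py | checkIfFits
-- ===== SOURCE A (Python) =====
-- def checkIfFits(x):
--     cntA = 0
--     cntN = 0
--     for i in x:
--         if (i.isalpha()):
--             cntA = cntA + 1
--         elif (i.isnumeric()):
--             cntN = cntN + 1
--     if(cntA > 0 and cntN > 0):
--         if x.islower():
--             return False
--         else:
--             return True
-- ===== SOURCE B (Python) =====
-- def checkIfFits(x):
--     # Single pass: classify every character into a 3-bit mask
--     # (bit0 = lowercase letter, bit1 = uppercase letter, bit2 = numeric).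
--     m = 0
--     for c in x:
--         if c.islower():
--             m |= 1
--         elif c.isupper():
--             m |= 2
--         elif c.isnumeric():
--             m |= 4
--     if m & 3 and m & 4:
--         # both a letter and a numeral present; x.islower() holds exactly
--         # when the mask is 5 (lowercase + numeric, no uppercase)
--         return m != 5
-- ===== Notes on version B (the rewrite author's own statement) =====
-- stated objective: alternative
-- what changed: Replaces the two-counter loop plus a separate x.islower() pass by a single pass that classifies each character into a 3-bit mask (lower/upper/numeric) and reads the whole answer off the final mask (answer is m != 5), eliminating both the counters and the second islower() scan.
import Mathlib
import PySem

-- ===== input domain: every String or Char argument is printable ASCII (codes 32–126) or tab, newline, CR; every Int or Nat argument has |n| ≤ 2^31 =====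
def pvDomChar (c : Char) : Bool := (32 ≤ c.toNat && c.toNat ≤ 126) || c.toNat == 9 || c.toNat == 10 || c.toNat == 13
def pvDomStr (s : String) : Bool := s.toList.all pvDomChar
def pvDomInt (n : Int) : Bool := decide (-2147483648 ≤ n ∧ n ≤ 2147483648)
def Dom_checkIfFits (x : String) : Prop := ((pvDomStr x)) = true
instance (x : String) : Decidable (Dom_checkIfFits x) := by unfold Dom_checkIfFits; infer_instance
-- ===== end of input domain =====

-- B replaces A's two-counter loop plus separate islower() pass by one pass that
-- classifies each character into a 3-bit mask and reads the answer off the mask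
-- (alternative decomposition; return value only).

-- shared primitive: Python str.islower() — true iff some cased char exists and no
-- cased char is uppercase; exact on the ASCII domain (where cased = letters).
def pyIslower (cs : List Char) : Bool :=
  cs.any PySem.Chars.islower && cs.all (fun c => !PySem.Chars.isupper c)

-- ===== PORT A =====
-- c.isnumeric() is ported as PySem.Chars.isdigit: on the ASCII domain the two agree.
def checkIfFitsLoop (cs : List Char) (s : Int × Int) : Int × Int :=
  match cs with
  | [] => s
  | c :: r =>
    if PySem.Chars.isalpha c then checkIfFitsLoop r (s.1 + 1, s.2)
    else if PySem.Chars.isdigit c then checkIfFitsLoop r (s.1, s.2 + 1)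
    else checkIfFitsLoop r s

def checkIfFits (x : String) : Option Bool :=
  let s := checkIfFitsLoop x.toList (0, 0)
  if s.1 > 0 ∧ s.2 > 0 then
    if pyIslower x.toList then some false else some true
  else none

-- ===== PORT B =====
-- single pass: m |= 1 for a lowercase letter, 2 for uppercase, 4 for a digit
def maskLoop (cs : List Char) (m : Nat) : Nat :=
  match cs with
  | [] => m
  | c :: r =>
    if PySem.Chars.islower c then maskLoop r (m ||| 1)
    else if PySem.Chars.isupper c then maskLoop r (m ||| 2)
    else if PySem.Chars.isdigit c then maskLoop r (m ||| 4)
    else maskLoop r m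

def checkIfFits_alt (x : String) : Option Bool :=
  let m := maskLoop x.toList 0
  if m &&& 3 ≠ 0 ∧ m &&& 4 ≠ 0 then some (decide (m ≠ 5)) else none

-- ===== PRECONDITION & SPEC =====
def Spec_checkIfFits (x : String) (out : Option Bool) : Prop := out = checkIfFits_alt x
instance (x : String) (out : Option Bool) : Decidable (Spec_checkIfFits x out) := by unfold Spec_checkIfFits; infer_instance

-- ===== CLAIM (what is proved, stated in full; the proofs are below) =====
def Claim_equal_checkIfFits : Prop := ∀ (x : String), Dom_checkIfFits x → Spec_checkIfFits x (checkIfFits x)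

-- ===== LEMMAS AND PROOFS =====

-- character classes are disjoint and isalpha = islower ∨ isupper (ASCII ranges)
theorem islower_not_isupper (c : Char) (h : PySem.Chars.islower c = true) :
    PySem.Chars.isupper c = false := by
  simp only [PySem.Chars.islower, PySem.Chars.isupper, decide_eq_true_eq,
    Bool.and_eq_true, decide_eq_false_iff_not, Bool.and_eq_false_iff, Char.le_def,
    UInt32.le_iff_toNat_le, not_le] at *
  have hA : 'A'.val.toNat = 65 := rfl
  have hZ : 'Z'.val.toNat = 90 := rfl
  have ha : 'a'.val.toNat = 97 := rfl
  omega

theorem isdigit_not_isalpha (c : Char) (h : PySem.Chars.isdigit c = true) :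
    PySem.Chars.isalpha c = false := by
  simp only [PySem.Chars.isdigit, PySem.Chars.isalpha, PySem.Chars.isupper, PySem.Chars.islower,
    Bool.and_eq_true, Bool.or_eq_false_iff, Bool.and_eq_false_iff, decide_eq_true_eq,
    decide_eq_false_iff_not, Char.le_def, UInt32.le_iff_toNat_le, not_le] at *
  have h0 : '0'.val.toNat = 48 := rfl
  have h9 : '9'.val.toNat = 57 := rfl
  have hA : 'A'.val.toNat = 65 := rfl
  have hZ : 'Z'.val.toNat = 90 := rfl
  have ha : 'a'.val.toNat = 97 := rfl
  have hz : 'z'.val.toNat = 122 := rfl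
  omega

theorem isalpha_eq (c : Char) :
    PySem.Chars.isalpha c = (PySem.Chars.islower c || PySem.Chars.isupper c) := by
  simp only [PySem.Chars.isalpha, Bool.or_comm]

-- A's loop computes the two counts
theorem checkIfFitsLoop_eq (cs : List Char) (a n : Int) :
    checkIfFitsLoop cs (a, n) =
      (a + (cs.countP PySem.Chars.isalpha : Int),
       n + (cs.countP (fun c => !PySem.Chars.isalpha c && PySem.Chars.isdigit c) : Int)) := by
  induction cs generalizing a n with
  | nil => simp [checkIfFitsLoop]
  | cons c r ih =>
    simp only [checkIfFitsLoop, List.countP_cons]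
    by_cases h : PySem.Chars.isalpha c = true
    · simp [h, ih]; omega
    · by_cases h2 : PySem.Chars.isdigit c = true
      · simp [h, h2, ih]; omega
      · simp [h, h2, ih]

theorem countP_digit_eq (cs : List Char) :
    cs.countP (fun c => !PySem.Chars.isalpha c && PySem.Chars.isdigit c)
      = cs.countP PySem.Chars.isdigit := by
  apply List.countP_congr
  intro c _
  by_cases h : PySem.Chars.isdigit c = true
  · simp [h, isdigit_not_isalpha c h]
  · simp at h; simp [h]

theorem countP_pos_iff_any (p : Char → Bool) (cs : List Char) :
    (0 < (cs.countP p : Int)) ↔ cs.any p = true := by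
  rw [List.any_eq_true, Int.natCast_pos, List.countP_pos_iff]

-- B's loop factors through its start mask
theorem maskLoop_or (cs : List Char) (m : Nat) :
    maskLoop cs m = m ||| maskLoop cs 0 := by
  induction cs generalizing m with
  | nil => simp [maskLoop]
  | cons c r ih =>
    simp only [maskLoop]
    split_ifs with h1 h2 h3
    · rw [ih (m ||| 1), ih (0 ||| 1)]; simp [Nat.or_assoc]
    · rw [ih (m ||| 2), ih (0 ||| 2)]; simp [Nat.or_assoc]
    · rw [ih (m ||| 4), ih (0 ||| 4)]; simp [Nat.or_assoc]
    · exact ih m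

-- the final mask as three presence bits
theorem maskLoop_zero (cs : List Char) :
    maskLoop cs 0 =
      (if cs.any PySem.Chars.islower then 1 else 0) |||
      (if cs.any PySem.Chars.isupper then 2 else 0) |||
      (if cs.any PySem.Chars.isdigit then 4 else 0) := by
  induction cs with
  | nil => simp [maskLoop]
  | cons c r ih =>
    simp only [maskLoop, List.any_cons]
    by_cases h1 : PySem.Chars.islower c = true
    · have h2 : PySem.Chars.isupper c = false := islower_not_isupper c h1
      have h3 : PySem.Chars.isdigit c = false := by
        by_contra hx
        simp only [Bool.not_eq_false] at hx
        have := isdigit_not_isalpha c hx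
        rw [isalpha_eq, h1] at this; simp at this
      rw [maskLoop_or, ih]
      simp only [h1, h2, h3, Bool.true_or, Bool.false_or, if_true]
      rcases r.any PySem.Chars.islower <;> rcases r.any PySem.Chars.isupper <;>
        rcases r.any PySem.Chars.isdigit <;> decide
    · simp only [Bool.not_eq_true] at h1
      by_cases h2 : PySem.Chars.isupper c = true
      · have h3 : PySem.Chars.isdigit c = false := by
          by_contra hx
          simp only [Bool.not_eq_false] at hx
          have := isdigit_not_isalpha c hx
          rw [isalpha_eq, h2] at this; simp at this
        rw [if_neg (by simp [h1]), if_pos h2, maskLoop_or, ih]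
        simp only [h1, h2, h3, Bool.true_or, Bool.false_or, if_true]
        rcases r.any PySem.Chars.islower <;> rcases r.any PySem.Chars.isupper <;>
          rcases r.any PySem.Chars.isdigit <;> decide
      · simp only [Bool.not_eq_true] at h2
        by_cases h3 : PySem.Chars.isdigit c = true
        · rw [if_neg (by simp [h1]), if_neg (by simp [h2]), if_pos h3, maskLoop_or, ih]
          simp only [h1, h2, h3, Bool.true_or, Bool.false_or, if_true]
          rcases r.any PySem.Chars.islower <;> rcases r.any PySem.Chars.isupper <;>
            rcases r.any PySem.Chars.isdigit <;> decide
        · simp only [Bool.not_eq_true] at h3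
          rw [if_neg (by simp [h1]), if_neg (by simp [h2]), if_neg (by simp [h3]), ih]
          simp [h1, h2, h3]

-- any isalpha splits into the two letter cases
theorem any_isalpha_eq (cs : List Char) :
    cs.any PySem.Chars.isalpha
      = (cs.any PySem.Chars.islower || cs.any PySem.Chars.isupper) := by
  induction cs with
  | nil => simp
  | cons c r ih =>
    simp only [List.any_cons, ih, isalpha_eq]
    rcases PySem.Chars.islower c <;> rcases PySem.Chars.isupper c <;>
      rcases r.any PySem.Chars.islower <;> rcases r.any PySem.Chars.isupper <;> rfl

theorem all_not_isupper_eq (cs : List Char) :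
    cs.all (fun c => !PySem.Chars.isupper c) = !cs.any PySem.Chars.isupper := by
  simp [List.all_eq_not_any_not]

-- ===== VERDICT (by name: the statement is the Claim_ definition above) =====
theorem checkIfFits_spec : Claim_equal_checkIfFits := by
  intro x _
  unfold Spec_checkIfFits checkIfFits checkIfFits_alt pyIslower
  simp only [checkIfFitsLoop_eq, countP_digit_eq, zero_add, maskLoop_zero,
    countP_pos_iff_any, any_isalpha_eq, all_not_isupper_eq]
  rcases hl : x.toList.any PySem.Chars.islower <;>
    rcases hu : x.toList.any PySem.Chars.isupper <;>
    rcases hd : x.toList.any PySem.Chars.isdigit <;>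
    simp
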